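-- pv_equiv track=rewrite | github.com/Flo10394/qrDecoder | helper.py | evalLine
-- ===== SOURCE A (Python) =====
-- def evalLine(line):
--     sumwhite = 0
--     sumblack = 0
--     thresh = 2
--     first = 1
--     color = line[0]
--     for pixel in line:
--         if pixel != 0:
--             sumwhite += 1  # here starts the white area
--             if(color == 0):
--                 if not(first):
--                     if(abs(sumwhite - sumblack) <= thresh):
--                         # this is valid
--
--                         return [1, int((sumblack + sumwhite) / 2)]
--                     else:
--                         return [0, 0]
--                 else:
--                     sumblack = 0
--                     first = 0
--             color = 1
--         else:
--             sumblack += 1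
--             color = 0
-- ===== SOURCE B (Python) =====
-- def evalLine(line):
--     # Run-length encode the line: (is_white, length) for each maximal run of
--     # pixels of equal color, then walk the runs instead of single pixels.
--     runs = []
--     i = 0
--     n = len(line)
--     while i < n:
--         white = line[i] != 0
--         j = i + 1
--         while j < n and (line[j] != 0) == white:
--             j += 1
--         runs.append((white, j - i))
--         i = j
--     # The first black->white boundary starts the measured black area; the
--     # second one ends it and the balance is judged at its first white pixel.
--     whites = 0
--     blacks = 0
--     seen_transition = False
--     for i, (white, length) in enumerate(runs):
--         if not white:
--             blacks += length
--         elif i == 0: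
--             whites += length
--         elif not seen_transition:
--             seen_transition = True
--             blacks = 0
--             whites += length
--         else:
--             whites += 1
--             if abs(whites - blacks) <= 2:
--                 return [1, (whites + blacks) // 2]
--             return [0, 0]
--     return None
-- ===== Notes on version B (the rewrite author's own statement) =====
-- stated objective: alternative
-- what changed: B replaces A's pixel-by-pixel state machine (sumwhite/sumblack/first/color with an early return) by a run-length encoding of the line followed by a walk over the runs, aggregating whole runs at a time; the empty line, where A raises IndexError, is excluded by Pre_.
import Mathlib
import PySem

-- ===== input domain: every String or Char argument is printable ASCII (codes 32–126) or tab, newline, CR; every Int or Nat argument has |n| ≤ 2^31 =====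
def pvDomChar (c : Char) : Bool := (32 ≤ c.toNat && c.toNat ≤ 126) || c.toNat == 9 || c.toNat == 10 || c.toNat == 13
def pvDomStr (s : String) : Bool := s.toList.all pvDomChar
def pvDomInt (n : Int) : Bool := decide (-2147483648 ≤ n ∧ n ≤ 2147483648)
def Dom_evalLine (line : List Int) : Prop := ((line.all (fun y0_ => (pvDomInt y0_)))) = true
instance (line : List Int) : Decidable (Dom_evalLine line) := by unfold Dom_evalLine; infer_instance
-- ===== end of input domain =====

-- B run-length encodes the line and walks the runs instead of the single pixels;
-- same return value on every non-empty line (the empty line, where A raises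
-- IndexError, is excluded by Pre_evalLine; B returns none there).

-- ===== PORT A =====
-- the for-loop of A as structural recursion over the remaining pixels, carrying
-- the same state (sumwhite, sumblack, first, color); thresh = 2 inlined.
-- int((sumblack + sumwhite) / 2) is ported as floor division: exact here since
-- both summands are nonnegative counts (float vs int division agree on this range).
def goA : List Int → Int → Int → Int → Int → Option (List Int)
  | [], _, _, _, _ => none
  | p :: rest, sumwhite, sumblack, first, color =>
    if p ≠ 0 then
      let sumwhite := sumwhite + 1
      if color = 0 then
        if first = 0 then
          if |sumwhite - sumblack| ≤ 2 then
            some [1, PySem.Int.floordiv (sumblack + sumwhite) 2]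
          else some [0, 0]
        else goA rest sumwhite 0 0 1
      else goA rest sumwhite sumblack first 1
    else goA rest sumwhite (sumblack + 1) first 0

def evalLine (line : List Int) : Option (List Int) :=
  match PySem.List.pyGet? line 0 with
  | none => none          -- indexing the first pixel raises IndexError: excluded by Pre_evalLine
  | some color => goA line 0 0 1 color

-- ===== PORT B =====
-- inner while loop of Source B: length of the prefix whose (pixel != 0) equals white,
-- together with the remaining suffix (i.e. j - i - 1 and the list from j on)
def splitRun (k : Bool) : List Int → Int × List Int
  | [] => (0, [])
  | p :: r =>
    if decide (p ≠ 0) = k then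
      let s := splitRun k r
      (s.1 + 1, s.2)
    else (0, p :: r)

theorem splitRun_len_le (k : Bool) : ∀ l : List Int, (splitRun k l).2.length ≤ l.length := by
  intro l
  induction l with
  | nil => simp [splitRun]
  | cons p r ih =>
    by_cases h : decide (p ≠ 0) = k
    · simp only [splitRun, if_pos h, List.length_cons]; omega
    · simp only [splitRun, if_neg h]; exact le_refl _

-- outer while loop of Source B: the run-length encoding
def rle : List Int → List (Bool × Int)
  | [] => []
  | p :: rest =>
    let k := decide (p ≠ 0)
    (k, (splitRun k rest).1 + 1) :: rle (splitRun k rest).2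
termination_by l => l.length
decreasing_by
  have := splitRun_len_le (decide (p ≠ 0)) rest
  simp only [List.length_cons]; omega

-- the for-loop of Source B over enumerate(runs), carrying (i, whites, blacks, seen_transition)
def goB : List (Bool × Int) → Int → Int → Int → Bool → Option (List Int)
  | [], _, _, _, _ => none
  | (white, length) :: rest, i, whites, blacks, seen =>
    if white = false then goB rest (i + 1) whites (blacks + length) seen
    else if i = 0 then goB rest (i + 1) (whites + length) blacks seen
    else if seen = false then goB rest (i + 1) (whites + length) 0 true
    else
      let whites := whites + 1
      if |whites - blacks| ≤ 2 then some [1, PySem.Int.floordiv (whites + blacks) 2]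
      else some [0, 0]

def evalLine_alt (line : List Int) : Option (List Int) :=
  goB (rle line) 0 0 0 false

-- ===== PRECONDITION & SPEC =====
-- A indexes the first pixel up front: the empty line raises IndexError and is excluded.
def Pre_evalLine (line : List Int) : Prop := line ≠ []
instance (line : List Int) : Decidable (Pre_evalLine line) := by unfold Pre_evalLine; infer_instance
def pvWitness_evalLine : List Int := ([1, 0, 1, 0, 1])

def Spec_evalLine (line : List Int) (out : Option (List Int)) : Prop := out = evalLine_alt line
instance (line : List Int) (out : Option (List Int)) : Decidable (Spec_evalLine line out) := by unfold Spec_evalLine; infer_instance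

-- ===== CLAIM (what is proved, stated in full; the proofs are below) =====
def Claim_equal_evalLine : Prop := ∀ (line : List Int), Dom_evalLine line → Pre_evalLine line → Spec_evalLine line (evalLine line)

-- ===== LEMMAS AND PROOFS =====

theorem goA_white : ∀ (l : List Int) (sw sb first c : Int), c ≠ 0 →
    goA l sw sb first c = goA (splitRun true l).2 (sw + (splitRun true l).1) sb first 1 := by
  intro l
  induction l with
  | nil => intro sw sb first c hc; simp [goA, splitRun]
  | cons p r ih =>
    intro sw sb first c hc
    by_cases hp : p = 0
    · simp [goA, splitRun, hp]
    · simp only [goA, splitRun, hp, hc, ne_eq, not_false_eq_true, decide_true, if_pos, if_neg]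
      rw [ih (sw + 1) sb first 1 one_ne_zero]
      have h : sw + 1 + (splitRun true r).1 = sw + ((splitRun true r).1 + 1) := by ring
      rw [h]

theorem goA_black0 : ∀ (l : List Int) (sw sb first : Int),
    goA l sw sb first 0 = goA (splitRun false l).2 sw (sb + (splitRun false l).1) first 0 := by
  intro l
  induction l with
  | nil => intro sw sb first; simp [goA, splitRun]
  | cons p r ih =>
    intro sw sb first
    by_cases hp : p = 0
    · simp only [goA, splitRun, hp, ne_eq, not_true_eq_false, decide_false, if_pos, if_false]
      rw [ih sw (sb + 1) first]
      have h : sb + 1 + (splitRun false r).1 = sb + ((splitRun false r).1 + 1) := by ring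
      rw [h]
    · simp [goA, splitRun, hp]

theorem splitRun_rest_head (k : Bool) : ∀ (l : List Int) (p : Int) (r : List Int),
    (splitRun k l).2 = p :: r → decide (p ≠ 0) = !k := by
  intro l
  induction l with
  | nil => intro p r h; simp [splitRun] at h
  | cons q t ih =>
    intro p r h
    by_cases hq : decide (q ≠ 0) = k
    · exact ih p r (by simpa [splitRun, hq] using h)
    · simp only [splitRun, if_neg hq] at h
      cases h
      cases k <;> simp_all

theorem evalLine_spec : Claim_equal_evalLine := by
  intro line _ hpre
  unfold Spec_evalLine
  cases line with
  | nil => exact absurd rfl hpre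
  | cons p rest =>
    rw [show evalLine (p :: rest) = goA (p :: rest) 0 0 1 p from by
      simp [evalLine]]
    by_cases hp : p = 0
    · subst hp
      rw [show goA (0 :: rest) 0 0 1 0 = goA rest 0 1 1 0 from by simp [goA]]
      rw [goA_black0]
      rcases h1 : splitRun false rest with ⟨n1, l1⟩
      dsimp only
      cases l1 with
      | nil => simp [goA, evalLine_alt, rle, goB, h1]
      | cons q l1' =>
        have hq : q ≠ 0 := by
          have := splitRun_rest_head false rest q l1' (by rw [h1]); simpa using this
        rw [show goA (q :: l1') 0 (1 + n1) 1 0 = goA l1' 1 0 0 1 from by simp [goA, hq]]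
        rw [goA_white l1' 1 0 0 1 one_ne_zero]
        rcases h2 : splitRun true l1' with ⟨m2, l2⟩
        dsimp only
        cases l2 with
        | nil => simp [goA, evalLine_alt, rle, goB, h1, h2, hq]
        | cons z l2' =>
          have hz : z = 0 := by
            have := splitRun_rest_head true l1' z l2' (by rw [h2]); simpa using this
          subst hz
          rw [show goA (0 :: l2') (1 + m2) 0 0 1 = goA l2' (1 + m2) 1 0 0 from by simp [goA]]
          rw [goA_black0]
          rcases h3 : splitRun false l2' with ⟨n3, l3⟩
          dsimp only
          cases l3 with
          | nil => simp [goA, evalLine_alt, rle, goB, h1, h2, h3, hq]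
          | cons w l3' =>
            have hw : w ≠ 0 := by
              have := splitRun_rest_head false l2' w l3' (by rw [h3]); simpa using this
            simp [goA, evalLine_alt, rle, goB, h1, h2, h3, hq, hw]
            rw [show (1:ℤ) + m2 + 1 - (1 + n3) = m2 + 1 - n3 from by ring,
                show (1:ℤ) + n3 + (1 + m2 + 1) = m2 + 1 + 1 + (n3 + 1) from by ring]
    · rw [show goA (p :: rest) 0 0 1 p = goA rest 1 0 1 1 from by simp [goA, hp]]
      rw [goA_white rest 1 0 1 1 one_ne_zero]
      rcases h1 : splitRun true rest with ⟨m1, l1⟩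
      dsimp only
      cases l1 with
      | nil => simp [goA, evalLine_alt, rle, goB, h1, hp]
      | cons q l1' =>
        have hq : q = 0 := by
          have := splitRun_rest_head true rest q l1' (by rw [h1]); simpa using this
        subst hq
        rw [show goA (0 :: l1') (1 + m1) 0 1 1 = goA l1' (1 + m1) 1 1 0 from by simp [goA]]
        rw [goA_black0]
        rcases h2 : splitRun false l1' with ⟨n2, l2⟩
        dsimp only
        cases l2 with
        | nil => simp [goA, evalLine_alt, rle, goB, h1, h2, hp]
        | cons r2 l2' =>
          have hr : r2 ≠ 0 := by
            have := splitRun_rest_head false l1' r2 l2' (by rw [h2]); simpa using this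
          rw [show goA (r2 :: l2') (1 + m1) (1 + n2) 1 0 = goA l2' (1 + m1 + 1) 0 0 1 from by
            simp [goA, hr]]
          rw [goA_white l2' (1 + m1 + 1) 0 0 1 one_ne_zero]
          rcases h3 : splitRun true l2' with ⟨m3, l3⟩
          dsimp only
          cases l3 with
          | nil => simp [goA, evalLine_alt, rle, goB, h1, h2, h3, hp, hr]
          | cons z l3' =>
            have hz : z = 0 := by
              have := splitRun_rest_head true l2' z l3' (by rw [h3]); simpa using this
            subst hz
            rw [show goA (0 :: l3') (1 + m1 + 1 + m3) 0 0 1 = goA l3' (1 + m1 + 1 + m3) 1 0 0 from by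
              simp [goA]]
            rw [goA_black0]
            rcases h4 : splitRun false l3' with ⟨n4, l4⟩
            dsimp only
            cases l4 with
            | nil => simp [goA, evalLine_alt, rle, goB, h1, h2, h3, h4, hp, hr]
            | cons w l4' =>
              have hw : w ≠ 0 := by
                have := splitRun_rest_head false l3' w l4' (by rw [h4]); simpa using this
              simp [goA, evalLine_alt, rle, goB, h1, h2, h3, h4, hp, hr, hw]
              rw [show (1:ℤ) + m1 + 1 + m3 + 1 - (1 + n4) = m1 + 1 + (m3 + 1) - n4 from by ring,
                  show (1:ℤ) + n4 + (1 + m1 + 1 + m3 + 1) = m1 + 1 + (m3 + 1) + 1 + (n4 + 1) from by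
                    ring]
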